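-- pv_equiv track=rewrite | github.com/zwvista/LogicPuzzlesAutomator | Puzzles/LightenUp/main.py | format_digit_matrix
-- ===== SOURCE A (Python) =====
-- def format_digit_matrix(matrix, blocks):
--     lines = []
--     for row_idx, row in enumerate(matrix):
--         line = ''
--         for col_idx, col in enumerate(row):
--             line += 'W' if col == ' ' and (row_idx, col_idx) in blocks else col
--         lines.append(line + '`')
--
--     # 合并为多行字符串
--     result = '\n'.join(lines)
--     return result
-- ===== SOURCE B (Python) =====
-- def format_digit_matrix(matrix, blocks):
--     # Copy into a mutable grid, mark each blocked ' ' cell in place, then join.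
--     grid = [list(row) for row in matrix]
--     for r, c in blocks:
--         if 0 <= r < len(grid) and 0 <= c < len(grid[r]) and grid[r][c] == ' ':
--             grid[r][c] = 'W'
--     return '\n'.join(''.join(row) + '`' for row in grid)
-- ===== Notes on version B (the rewrite author's own statement) =====
-- stated objective: faster
-- what changed: Inverted the traversal: instead of testing every cell for membership in blocks, B copies the matrix into a mutable grid, marks each in-range blocked ' ' cell directly while iterating blocks once, and joins the rows.
import Mathlib
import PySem

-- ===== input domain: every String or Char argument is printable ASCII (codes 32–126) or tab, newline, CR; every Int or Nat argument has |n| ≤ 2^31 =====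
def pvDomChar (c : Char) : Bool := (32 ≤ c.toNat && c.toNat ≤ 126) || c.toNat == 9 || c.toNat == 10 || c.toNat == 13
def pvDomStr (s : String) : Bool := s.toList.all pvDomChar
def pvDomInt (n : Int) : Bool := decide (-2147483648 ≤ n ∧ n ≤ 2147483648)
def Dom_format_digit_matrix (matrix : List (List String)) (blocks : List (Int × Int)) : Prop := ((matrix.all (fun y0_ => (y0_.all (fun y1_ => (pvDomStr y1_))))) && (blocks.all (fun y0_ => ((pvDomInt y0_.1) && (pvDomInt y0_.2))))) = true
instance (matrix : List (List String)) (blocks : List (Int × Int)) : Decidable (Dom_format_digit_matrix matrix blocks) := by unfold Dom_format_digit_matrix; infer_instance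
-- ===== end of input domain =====

-- B inverts the traversal (mark blocked ' ' cells in a copied grid instead of a membership
-- test at every cell); one pass over blocks instead of one membership scan per cell.

-- ===== PORT A =====
def format_digit_matrix (matrix : List (List String)) (blocks : List (Int × Int)) : String :=
  let lines := (PySem.List.enumerate matrix).foldl (fun lines p =>
    let line := (PySem.List.enumerate p.2).foldl (fun line q =>
      line ++ (if q.2 = " " ∧ (p.1, q.1) ∈ blocks then "W" else q.2)) ""
    lines ++ [line ++ "`"]) ([] : List String)
  PySem.Str.join "\n" lines

-- ===== PORT B =====
-- grid[r][c] = 'W' when in range and the cell is ' ' (List.modify is a no-op out of range,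
-- matching Source B's bounds guard; the 0 ≤ guard matches its non-negativity test)
def pvMarkCell (cell : String) : String := if cell = " " then "W" else cell

def pvStep (g : List (List String)) (p : Int × Int) : List (List String) :=
  if 0 ≤ p.1 ∧ 0 ≤ p.2 then
    g.modify p.1.toNat (fun row => row.modify p.2.toNat pvMarkCell)
  else g

def format_digit_matrix_alt (matrix : List (List String)) (blocks : List (Int × Int)) : String :=
  let grid := blocks.foldl pvStep matrix
  PySem.Str.join "\n" (grid.map (fun row => PySem.Str.join "" row ++ "`"))

-- ===== PRECONDITION & SPEC =====
def Spec_format_digit_matrix (matrix : List (List String)) (blocks : List (Int × Int)) (out : String) : Prop := out = format_digit_matrix_alt matrix blocks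
instance (matrix : List (List String)) (blocks : List (Int × Int)) (out : String) : Decidable (Spec_format_digit_matrix matrix blocks out) := by unfold Spec_format_digit_matrix; infer_instance

-- ===== CLAIM (what is proved, stated in full; the proofs are below) =====
def Claim_equal_format_digit_matrix : Prop := ∀ (matrix : List (List String)) (blocks : List (Int × Int)), Dom_format_digit_matrix matrix blocks → Spec_format_digit_matrix matrix blocks (format_digit_matrix matrix blocks)

-- ===== LEMMAS AND PROOFS =====

-- the intended value of cell (i, j)
def pvCell (blocks : List (Int × Int)) (i j : Nat) (cell : String) : String :=
  if cell = " " ∧ ((i : Int), (j : Int)) ∈ blocks then "W" else cell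

-- the whole grid, marked pointwise
def pvGrid (blocks : List (Int × Int)) (m : List (List String)) : List (List String) :=
  m.mapIdx (fun i row => row.mapIdx (fun j cell => pvCell blocks i j cell))

lemma pvGrid_nil (m : List (List String)) : pvGrid [] m = m := by
  apply List.ext_getElem
  · simp [pvGrid]
  · intro i h1 h2
    simp only [pvGrid, List.getElem_mapIdx]
    apply List.ext_getElem
    · simp
    · intro j h3 h4
      simp [pvCell]

lemma pvStep_length (m : List (List String)) (p : Int × Int) :
    (pvStep m p).length = m.length := by
  simp only [pvStep]; split <;> simp

lemma pvGrid_step (p : Int × Int) (bs : List (Int × Int)) (m : List (List String)) :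
    pvGrid bs (pvStep m p) = pvGrid (p :: bs) m := by
  apply List.ext_getElem
  · simp [pvGrid, pvStep_length]
  · intro i h1 h2
    simp only [pvGrid, List.getElem_mapIdx]
    apply List.ext_getElem
    · simp only [List.length_mapIdx]
      by_cases hg : 0 ≤ p.1 ∧ 0 ≤ p.2
      · simp [pvStep, hg, List.getElem_modify]; split <;> simp
      · simp [pvStep, hg]
    · intro j h3 h4
      simp only [List.getElem_mapIdx]
      have him : i < m.length := by
        have := h2; simpa [pvGrid] using this
      have hjm : j < m[i].length := by
        have := h4; simpa using this
      by_cases hg : 0 ≤ p.1 ∧ 0 ≤ p.2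
      · simp only [pvStep, if_pos hg, List.getElem_modify]
        by_cases hi : p.1.toNat = i
        · simp only [if_pos hi, List.getElem_modify]
          by_cases hj : p.2.toNat = j
          · have hp : p = ((i : Int), (j : Int)) := by
              obtain ⟨h5, h6⟩ := hg
              obtain ⟨a, b⟩ := p
              simp_all
              omega
            by_cases hc : m[i][j] = " "
            · simp [pvCell, pvMarkCell, hc, hp]
            · simp [hj, pvCell, pvMarkCell, hc]
          · have hp : ((i : Int), (j : Int)) ≠ p := by
              intro h; rw [← h] at hj; simp at hj
            simp [hj, pvCell, List.mem_cons, hp]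
        · have hp : ((i : Int), (j : Int)) ≠ p := by
            intro h; rw [← h] at hi; simp at hi
          simp [hi, pvCell, List.mem_cons, hp]
      · have hp : ((i : Int), (j : Int)) ≠ p := by
          intro h; rw [← h] at hg; simp at hg
        simp only [pvStep, if_neg hg]
        simp [pvCell, List.mem_cons, hp]

lemma pvFold_eq_grid (blocks : List (Int × Int)) (m : List (List String)) :
    blocks.foldl pvStep m = pvGrid blocks m := by
  induction blocks generalizing m with
  | nil => simp [pvGrid_nil]
  | cons p bs ih => rw [List.foldl_cons, ih, pvGrid_step]

lemma pvJoin_empty_cons (a : String) (l : List String) :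
    PySem.Str.join "" (a :: l) = a ++ PySem.Str.join "" l := by
  rw [← String.toList_inj]
  simp only [PySem.Str.toList_join, List.map_cons, String.toList_append]
  cases l with
  | nil => simp [PySem.Chars.join_singleton, PySem.Chars.join_nil]
  | cons b t =>
      rw [List.map_cons, PySem.Chars.join_cons_cons]
      simp

lemma pvFoldl_concat {α : Type} (l : List α) (f : α → String) (init : String) :
    l.foldl (fun s x => s ++ f x) init = init ++ PySem.Str.join "" (l.map f) := by
  induction l generalizing init with
  | nil =>
      have h : PySem.Str.join "" ([] : List String) = "" := rfl
      simp [h]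
  | cons a t ih =>
      rw [List.foldl_cons, ih, List.map_cons, pvJoin_empty_cons, String.append_assoc]

lemma pvFoldl_snoc {α β : Type} (l : List α) (f : α → β) (init : List β) :
    l.foldl (fun acc x => acc ++ [f x]) init = init ++ l.map f := by
  induction l generalizing init with
  | nil => simp
  | cons a t ih => simp [ih]

lemma pvLines_eq (matrix : List (List String)) (blocks : List (Int × Int)) :
    (PySem.List.enumerate matrix).map (fun p =>
        (PySem.Str.join "" ((PySem.List.enumerate p.2).map (fun q =>
          if q.2 = " " ∧ (p.1, q.1) ∈ blocks then "W" else q.2))) ++ "`")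
      = (pvGrid blocks matrix).map (fun row => PySem.Str.join "" row ++ "`") := by
  apply List.ext_getElem
  · simp [pvGrid, PySem.List.length_enumerate]
  · intro i h1 h2
    simp only [List.getElem_map, PySem.List.getElem_enumerate, pvGrid, List.getElem_mapIdx]
    congr 1
    congr 1
    apply List.ext_getElem
    · simp [PySem.List.length_enumerate]
    · intro j h3 h4
      simp [PySem.List.getElem_enumerate, pvCell]

-- ===== VERDICT (by name: the statement is the Claim_ definition above) =====
theorem format_digit_matrix_spec : Claim_equal_format_digit_matrix := by
  intro matrix blocks _
  unfold Spec_format_digit_matrix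
  simp only [format_digit_matrix, format_digit_matrix_alt]
  rw [pvFold_eq_grid, ← pvLines_eq]
  congr 1
  rw [pvFoldl_snoc]
  simp only [List.nil_append]
  apply List.map_congr_left
  intro p _
  congr 1
  rw [pvFoldl_concat]
  simp
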